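-- pv_equiv track=rewrite | github.com/zachares/deep_learning | deep_learning/models_manager/cnns.py | get_chan_list
-- ===== SOURCE A (Python) =====
-- from typing import List, Tuple
--
-- def get_prime_fact(num : int) -> List[int]:
--     """ Calculates a list of prime factors for an integer, but only
--         supports integers which only have the prime factors 7, 5, 3, 2
--         If a prime factor appears twice in the numbers factorization,
--         it appears twice in the list that is returned.
--
--         Raises:
--             ValueError: if the integer has a prime factor other than
--             7,5,3 or 2.
--     """
--     temp_num = num
--     prime_fact_list = []
--
--     while temp_num != 1:
--         if temp_num % 7 == 0:
--             temp_num = temp_num / 7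
--             prime_fact_list.append(7)
--         elif temp_num % 5 == 0:
--             temp_num = temp_num / 5
--             prime_fact_list.append(5)
--         elif temp_num % 3 == 0:
--             temp_num = temp_num / 3
--             prime_fact_list.append(3)
--         elif temp_num % 2 == 0:
--             temp_num = temp_num / 2
--             prime_fact_list.append(2)
--         else:
--             raise ValueError("unsupported number " + str(num))
--
--     if len(prime_fact_list) == 0:
--         return []
--     else:
--         prime_fact_list.sort()
--         prime_fact_list.reverse()
--
--         return prime_fact_list
--
-- def get_chan_list(input_size : int, output_size : int) -> List[int]:
--     """ Calculates a list of channel sizes for a convolutional neural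
--         network's layers
--
--         Args:
--             input_size: an integer describing the network's first layer's
--             channel size
--             output_size: an integer describing the network's last layer's
--             desired channel size
--     """
--     chan_list = [input_size]
--
--     if input_size > output_size:
--         chan_list = get_chan_list(output_size, input_size)
--         chan_list.reverse()
--         return chan_list
--
--     elif input_size < output_size:
--         if output_size % input_size == 0:
--             prime_factors = get_prime_fact(output_size // input_size)
--         else:
--             chan_list.append(input_size)
--             prime_factors = get_prime_fact(output_size)
--             chan_list.append(prime_factors[0])
--             prime_factors = prime_factors[1:]
--
--         for factor in prime_factors:
--             chan_list.append(chan_list[-1] * factor)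
--
--         return chan_list
--     else:
--         return [input_size, output_size]
-- ===== SOURCE B (Python) =====
-- def _smallest_supported_factor(n):
--     for p in (2, 3, 5, 7):
--         if n % p == 0:
--             return p
--     raise ValueError("unsupported number " + str(n))
--
-- def get_chan_list(input_size, output_size):
--     if input_size == output_size:
--         return [input_size, output_size]
--     ascending = input_size < output_size
--     lo, hi = (input_size, output_size) if ascending else (output_size, input_size)
--     # Build the chain top-down from hi by stripping the smallest supported
--     # prime factor at each step; the list is produced back-to-front and
--     # reversed once when the ascending orientation is requested.
--     chain = [hi]
--     if hi % lo == 0: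
--         ratio = hi // lo
--         while ratio != 1:
--             p = _smallest_supported_factor(ratio)
--             ratio //= p
--             chain.append(chain[-1] // p)
--     else:
--         while chain[-1] not in (2, 3, 5, 7):
--             chain.append(chain[-1] // _smallest_supported_factor(chain[-1]))
--         chain.append(lo)
--         chain.append(lo)
--     return chain[::-1] if ascending else chain
-- ===== Notes on version B (the rewrite author's own statement) =====
-- stated objective: alternative
-- what changed: B removes A's recursion and separate factorize-sort-multiply pipeline: it builds the channel chain back-to-front, starting from hi and repeatedly dividing out the smallest supported prime factor (2 first), with no prime-factor list, no sort and no upward multiplication, reversing once at the end for the ascending orientation.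
import Mathlib
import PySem

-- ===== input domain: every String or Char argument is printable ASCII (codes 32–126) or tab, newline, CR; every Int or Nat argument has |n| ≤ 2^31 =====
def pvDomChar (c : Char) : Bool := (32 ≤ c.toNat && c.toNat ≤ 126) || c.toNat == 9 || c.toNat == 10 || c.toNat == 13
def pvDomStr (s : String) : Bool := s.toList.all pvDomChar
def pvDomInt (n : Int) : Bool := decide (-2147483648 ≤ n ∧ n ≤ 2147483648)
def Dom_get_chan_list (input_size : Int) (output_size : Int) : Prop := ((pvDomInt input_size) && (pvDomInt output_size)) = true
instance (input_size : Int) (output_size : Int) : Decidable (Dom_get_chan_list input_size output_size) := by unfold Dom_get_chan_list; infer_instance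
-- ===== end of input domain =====

-- B builds the channel chain back-to-front from hi by stripping the smallest supported prime
-- factor at each step (no recursion, no factor list, no sort), reversing once at the end.

-- ===== PORT A =====
-- while-loop of get_prime_fact, with fuel (64 iterations suffice on admitted inputs, n ≤ 2^31;
-- fuel exhaustion / the Python ValueError both become `none`).  Python's `/` there is float
-- division but exact on the admitted (7-smooth, ≤ 2^31) inputs, so it is ported as floor division.
def gpfLoopA : Nat → Int → List Int → Option (List Int)
  | 0, _, _ => none
  | fuel+1, t, acc =>
    if t = 1 then some acc
    else if PySem.Int.mod t 7 = 0 then gpfLoopA fuel (PySem.Int.floordiv t 7) (acc ++ [7])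
    else if PySem.Int.mod t 5 = 0 then gpfLoopA fuel (PySem.Int.floordiv t 5) (acc ++ [5])
    else if PySem.Int.mod t 3 = 0 then gpfLoopA fuel (PySem.Int.floordiv t 3) (acc ++ [3])
    else if PySem.Int.mod t 2 = 0 then gpfLoopA fuel (PySem.Int.floordiv t 2) (acc ++ [2])
    else none  -- raise ValueError

def get_prime_fact (num : Int) : Option (List Int) :=
  match gpfLoopA 64 num [] with
  | none => none
  | some prime_fact_list =>
    if prime_fact_list.length = 0 then some []
    else some ((PySem.List.sorted prime_fact_list (fun x => x) false).reverse)

-- a raise of get_prime_fact propagates out of get_chan_list in Python; those inputs are outside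
-- Pre_, so the `.getD []` default below is never observed on admitted inputs.
def get_chan_list (input_size : Int) (output_size : Int) : List Int :=
  if input_size > output_size then
    (get_chan_list output_size input_size).reverse
  else if input_size < output_size then
    (if PySem.Int.mod output_size input_size = 0 then
      let prime_factors := (get_prime_fact (PySem.Int.floordiv output_size input_size)).getD []
      prime_factors.foldl (fun cl factor => cl ++ [(PySem.List.pyGet? cl (-1)).getD 0 * factor]) [input_size]
    else
      let prime_factors := (get_prime_fact output_size).getD []
      let cl := [input_size, input_size] ++ [(PySem.List.pyGet? prime_factors 0).getD 0]
      ((PySem.List.slice prime_factors (some 1) none).foldl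
        (fun cl factor => cl ++ [(PySem.List.pyGet? cl (-1)).getD 0 * factor]) cl))
  else [input_size, output_size]
termination_by (if input_size > output_size then 1 else 0)
decreasing_by simp_all; omega

-- ===== PORT B =====
-- the for-loop of _smallest_supported_factor (none = the Python ValueError)
def smallestFacB (n : Int) : Option Int :=
  if PySem.Int.mod n 2 = 0 then some 2
  else if PySem.Int.mod n 3 = 0 then some 3
  else if PySem.Int.mod n 5 = 0 then some 5
  else if PySem.Int.mod n 7 = 0 then some 7
  else none

-- the divisible-case while-loop of B, with fuel (64 iterations suffice on admitted inputs)
def divLoopB : Nat → Int → List Int → Option (List Int)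
  | 0, _, _ => none
  | fuel+1, ratio, chain =>
    if ratio = 1 then some chain
    else match smallestFacB ratio with
      | none => none
      | some p => divLoopB fuel (PySem.Int.floordiv ratio p)
          (chain ++ [PySem.Int.floordiv ((PySem.List.pyGet? chain (-1)).getD 0) p])

-- the non-divisible-case while-loop of B, with fuel
def nonDivLoopB : Nat → List Int → Option (List Int)
  | 0, _ => none
  | fuel+1, chain =>
    let last := (PySem.List.pyGet? chain (-1)).getD 0
    if last = 2 ∨ last = 3 ∨ last = 5 ∨ last = 7 then some chain
    else match smallestFacB last with
      | none => none
      | some p => nonDivLoopB fuel (chain ++ [PySem.Int.floordiv last p])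

def get_chan_list_alt (input_size : Int) (output_size : Int) : List Int :=
  if input_size = output_size then [input_size, output_size]
  else
    let lo := if input_size < output_size then input_size else output_size
    let hi := if input_size < output_size then output_size else input_size
    let chain :=
      if PySem.Int.mod hi lo = 0 then
        (divLoopB 64 (PySem.Int.floordiv hi lo) [hi]).getD []
      else
        (nonDivLoopB 64 [hi]).getD [] ++ [lo, lo]
    if input_size < output_size then chain.reverse else chain

-- ===== PRECONDITION & SPEC =====
-- n is 7-smooth (no prime factor other than 2, 3, 5, 7): stated as the cap-free closed
-- divisibility n ∣ 210^bitLength(n), which holds for exactly the 7-smooth positive integers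
-- (every prime exponent of a positive n is below its bit length).
abbrev Smooth7 (n : Int) : Prop := n ∣ (210 : Int) ^ PySem.Int.bitLength n

-- Exactly the inputs on which A returns normally: either the two sizes are equal, or (with
-- lo = min, hi = max, the pair the ascending computation runs on) lo ≠ 0 (else ZeroDivisionError)
-- and the number A factorizes — hi//lo if lo divides hi, else hi — is a positive 7-smooth
-- integer (else get_prime_fact raises ValueError, or loops forever on 0), with hi ≥ 2 in the
-- non-divisible case (hi = 1 would make prime_factors[0] an IndexError).
def Pre_get_chan_list (input_size : Int) (output_size : Int) : Prop :=
  input_size = output_size ∨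
    (min input_size output_size ≠ 0 ∧
      (if PySem.Int.mod (max input_size output_size) (min input_size output_size) = 0 then
        1 ≤ PySem.Int.floordiv (max input_size output_size) (min input_size output_size) ∧
          Smooth7 (PySem.Int.floordiv (max input_size output_size) (min input_size output_size))
      else 2 ≤ max input_size output_size ∧ Smooth7 (max input_size output_size)))

instance (input_size : Int) (output_size : Int) : Decidable (Pre_get_chan_list input_size output_size) := by
  unfold Pre_get_chan_list; infer_instance

def pvWitness_get_chan_list : Int × Int := (2, 4)

def Spec_get_chan_list (input_size : Int) (output_size : Int) (out : List Int) : Prop := out = get_chan_list_alt input_size output_size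
instance (input_size : Int) (output_size : Int) (out : List Int) : Decidable (Spec_get_chan_list input_size output_size out) := by unfold Spec_get_chan_list; infer_instance

-- ===== CLAIM (what is proved, stated in full; the proofs are below) =====
def Claim_equal_get_chan_list : Prop := ∀ (input_size : Int) (output_size : Int), Dom_get_chan_list input_size output_size → Pre_get_chan_list input_size output_size → Spec_get_chan_list input_size output_size (get_chan_list input_size output_size)

-- ===== LEMMAS AND PROOFS =====

-- number of times p divides n, and the remaining cofactor
def stripCount (p n : Nat) : Nat × Nat :=
  if h : 2 ≤ p ∧ 0 < n ∧ n % p = 0 then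
    ((stripCount p (n / p)).1 + 1, (stripCount p (n / p)).2)
  else (0, n)
termination_by n
decreasing_by exact Nat.div_lt_self h.2.1 (by omega)

-- the factor list A produces: all 7s, then 5s, then 3s, then 2s
def descList (n : Nat) : List Int :=
  List.replicate (stripCount 7 n).1 7 ++
    List.replicate (stripCount 5 (stripCount 7 n).2).1 5 ++
    List.replicate (stripCount 3 (stripCount 5 (stripCount 7 n).2).2).1 3 ++
    List.replicate (stripCount 2 (stripCount 3 (stripCount 5 (stripCount 7 n).2).2).2).1 2

theorem stripCount_of_dvd (p n : Nat) (hp : 2 ≤ p) (hn : 0 < n) (h : n % p = 0) :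
    stripCount p n = ((stripCount p (n / p)).1 + 1, (stripCount p (n / p)).2) := by
  rw [stripCount, dif_pos ⟨hp, hn, h⟩]

theorem stripCount_of_not (p n : Nat) (h : ¬ (2 ≤ p ∧ 0 < n ∧ n % p = 0)) :
    stripCount p n = (0, n) := by
  rw [stripCount, dif_neg h]

def SmoothN (n : Nat) : Prop := ∃ d c b a : Nat, n = 7^d * 5^c * 3^b * 2^a

theorem smoothN_of_dvd_pow : ∀ n : Nat, ∀ k : Nat, 0 < n → n ∣ 210^k → SmoothN n := by
  intro n
  induction n using Nat.strong_induction_on with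
  | _ n ih =>
    intro k hpos hdvd
    by_cases h1 : n = 1
    · exact ⟨0, 0, 0, 0, by simp [h1]⟩
    · have hmf : n.minFac.Prime := Nat.minFac_prime h1
      have hdvdn : n.minFac ∣ n := Nat.minFac_dvd n
      have hp210 : n.minFac ∣ 210 := hmf.dvd_of_dvd_pow (hdvdn.trans hdvd)
      rw [show (210:Nat) = 2*(3*(5*7)) by norm_num] at hp210
      have hmem : n.minFac = 2 ∨ n.minFac = 3 ∨ n.minFac = 5 ∨ n.minFac = 7 := by
        rcases (Nat.Prime.dvd_mul hmf).mp hp210 with h | h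
        · exact Or.inl ((Nat.prime_dvd_prime_iff_eq hmf Nat.prime_two).mp h)
        · rcases (Nat.Prime.dvd_mul hmf).mp h with h' | h'
          · exact Or.inr (Or.inl ((Nat.prime_dvd_prime_iff_eq hmf Nat.prime_three).mp h'))
          · rcases (Nat.Prime.dvd_mul hmf).mp h' with h'' | h''
            · exact Or.inr (Or.inr (Or.inl ((Nat.prime_dvd_prime_iff_eq hmf (by norm_num)).mp h'')))
            · exact Or.inr (Or.inr (Or.inr ((Nat.prime_dvd_prime_iff_eq hmf (by norm_num)).mp h'')))
      have hql : n / n.minFac < n := Nat.div_lt_self hpos (by have := hmf.two_le; omega)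
      have hqpos : 0 < n / n.minFac :=
        Nat.div_pos (Nat.le_of_dvd hpos hdvdn) (by have := hmf.two_le; omega)
      have hqdvd : n / n.minFac ∣ 210^k := (Nat.div_dvd_of_dvd hdvdn).trans hdvd
      obtain ⟨d, c, b, a, he⟩ := ih (n / n.minFac) hql k hqpos hqdvd
      have hn : n = n.minFac * (n / n.minFac) := (Nat.mul_div_cancel' hdvdn).symm
      rcases hmem with hm | hm | hm | hm
      · exact ⟨d, c, b, a + 1, by rw [hn, he, hm, pow_succ]; ring⟩
      · exact ⟨d, c, b + 1, a, by rw [hn, he, hm, pow_succ]; ring⟩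
      · exact ⟨d, c + 1, b, a, by rw [hn, he, hm, pow_succ]; ring⟩
      · exact ⟨d + 1, c, b, a, by rw [hn, he, hm, pow_succ]; ring⟩

theorem smoothN_of_smooth7 (n : Int) (h1 : 1 ≤ n) (h : Smooth7 n) : SmoothN n.toNat := by
  have h' : (n.toNat : Int) ∣ ((210^(PySem.Int.bitLength n) : Nat) : Int) := by
    rw [Int.toNat_of_nonneg (by omega)]
    exact_mod_cast h
  exact smoothN_of_dvd_pow n.toNat (PySem.Int.bitLength n) (by omega) (by exact_mod_cast h')

-- ----- exponent / divisibility bookkeeping for smooth numbers -----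

theorem mod2_iff (d c b a : Nat) : (7^d*5^c*3^b*2^a) % 2 = 0 ↔ 1 ≤ a := by
  constructor
  · intro h
    by_contra hne
    have ha : a = 0 := by omega
    subst ha
    have hdvd := Nat.dvd_of_mod_eq_zero h
    rw [pow_zero, mul_one] at hdvd
    have hcop : Nat.Coprime 2 (7^d*5^c*3^b) :=
      Nat.Coprime.mul_right (Nat.Coprime.mul_right (Nat.Coprime.pow_right d (by norm_num))
        (Nat.Coprime.pow_right c (by norm_num))) (Nat.Coprime.pow_right b (by norm_num))
    have := Nat.Coprime.eq_one_of_dvd hcop hdvd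
    omega
  · intro h
    obtain ⟨a', rfl⟩ : ∃ a', a = a' + 1 := ⟨a - 1, by omega⟩
    exact Nat.mod_eq_zero_of_dvd ⟨7^d*5^c*3^b*2^a', by rw [pow_succ]; ring⟩

theorem mod3_iff (d c b a : Nat) : (7^d*5^c*3^b*2^a) % 3 = 0 ↔ 1 ≤ b := by
  constructor
  · intro h
    by_contra hne
    have hb : b = 0 := by omega
    subst hb
    have hdvd := Nat.dvd_of_mod_eq_zero h
    rw [pow_zero, mul_one] at hdvd
    have hcop : Nat.Coprime 3 (7^d*5^c*2^a) :=
      Nat.Coprime.mul_right (Nat.Coprime.mul_right (Nat.Coprime.pow_right d (by norm_num))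
        (Nat.Coprime.pow_right c (by norm_num))) (Nat.Coprime.pow_right a (by norm_num))
    have := Nat.Coprime.eq_one_of_dvd hcop hdvd
    omega
  · intro h
    obtain ⟨b', rfl⟩ : ∃ b', b = b' + 1 := ⟨b - 1, by omega⟩
    exact Nat.mod_eq_zero_of_dvd ⟨7^d*5^c*3^b'*2^a, by rw [pow_succ]; ring⟩

theorem mod5_iff (d c b a : Nat) : (7^d*5^c*3^b*2^a) % 5 = 0 ↔ 1 ≤ c := by
  constructor
  · intro h
    by_contra hne
    have hc : c = 0 := by omega
    subst hc
    have hdvd := Nat.dvd_of_mod_eq_zero h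
    rw [pow_zero, mul_one] at hdvd
    have hcop : Nat.Coprime 5 (7^d*3^b*2^a) :=
      Nat.Coprime.mul_right (Nat.Coprime.mul_right (Nat.Coprime.pow_right d (by norm_num))
        (Nat.Coprime.pow_right b (by norm_num))) (Nat.Coprime.pow_right a (by norm_num))
    have := Nat.Coprime.eq_one_of_dvd hcop hdvd
    omega
  · intro h
    obtain ⟨c', rfl⟩ : ∃ c', c = c' + 1 := ⟨c - 1, by omega⟩
    exact Nat.mod_eq_zero_of_dvd ⟨7^d*5^c'*3^b*2^a, by rw [pow_succ]; ring⟩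

theorem mod7_iff (d c b a : Nat) : (7^d*5^c*3^b*2^a) % 7 = 0 ↔ 1 ≤ d := by
  constructor
  · intro h
    by_contra hne
    have hd : d = 0 := by omega
    subst hd
    have hdvd := Nat.dvd_of_mod_eq_zero h
    rw [pow_zero, one_mul] at hdvd
    have hcop : Nat.Coprime 7 (5^c*3^b*2^a) :=
      Nat.Coprime.mul_right (Nat.Coprime.mul_right (Nat.Coprime.pow_right c (by norm_num))
        (Nat.Coprime.pow_right b (by norm_num))) (Nat.Coprime.pow_right a (by norm_num))
    have := Nat.Coprime.eq_one_of_dvd hcop hdvd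
    omega
  · intro h
    obtain ⟨d', rfl⟩ : ∃ d', d = d' + 1 := ⟨d - 1, by omega⟩
    exact Nat.mod_eq_zero_of_dvd ⟨7^d'*5^c*3^b*2^a, by rw [pow_succ]; ring⟩

theorem no_factor_absurd (n : Nat) (h2 : 2 ≤ n) (h7 : ¬ n % 7 = 0) (h5 : ¬ n % 5 = 0)
    (h3 : ¬ n % 3 = 0) (hh2 : ¬ n % 2 = 0) (hs : SmoothN n) : False := by
  obtain ⟨d, c, b, a, rfl⟩ := hs
  have hd : d = 0 := by by_contra hne; exact h7 ((mod7_iff d c b a).mpr (by omega))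
  have hc : c = 0 := by by_contra hne; exact h5 ((mod5_iff d c b a).mpr (by omega))
  have hb : b = 0 := by by_contra hne; exact h3 ((mod3_iff d c b a).mpr (by omega))
  have ha : a = 0 := by by_contra hne; exact hh2 ((mod2_iff d c b a).mpr (by omega))
  subst hd hc hb ha
  simp at h2

theorem smooth_div7 (n : Nat) (hs : SmoothN n) (h : n % 7 = 0) : SmoothN (n / 7) := by
  obtain ⟨d, c, b, a, rfl⟩ := hs
  have hd : 1 ≤ d := (mod7_iff d c b a).mp h
  obtain ⟨d', rfl⟩ : ∃ d', d = d' + 1 := ⟨d - 1, by omega⟩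
  refine ⟨d', c, b, a, ?_⟩
  rw [show 7^(d'+1)*5^c*3^b*2^a = 7*(7^d'*5^c*3^b*2^a) by rw [pow_succ]; ring]
  exact Nat.mul_div_cancel_left _ (by omega)

theorem smooth_div5 (n : Nat) (hs : SmoothN n) (h : n % 5 = 0) : SmoothN (n / 5) := by
  obtain ⟨d, c, b, a, rfl⟩ := hs
  have hc : 1 ≤ c := (mod5_iff d c b a).mp h
  obtain ⟨c', rfl⟩ : ∃ c', c = c' + 1 := ⟨c - 1, by omega⟩
  refine ⟨d, c', b, a, ?_⟩
  rw [show 7^d*5^(c'+1)*3^b*2^a = 5*(7^d*5^c'*3^b*2^a) by rw [pow_succ]; ring]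
  exact Nat.mul_div_cancel_left _ (by omega)

theorem smooth_div3 (n : Nat) (hs : SmoothN n) (h : n % 3 = 0) : SmoothN (n / 3) := by
  obtain ⟨d, c, b, a, rfl⟩ := hs
  have hb : 1 ≤ b := (mod3_iff d c b a).mp h
  obtain ⟨b', rfl⟩ : ∃ b', b = b' + 1 := ⟨b - 1, by omega⟩
  refine ⟨d, c, b', a, ?_⟩
  rw [show 7^d*5^c*3^(b'+1)*2^a = 3*(7^d*5^c*3^b'*2^a) by rw [pow_succ]; ring]
  exact Nat.mul_div_cancel_left _ (by omega)

theorem smooth_div2 (n : Nat) (hs : SmoothN n) (h : n % 2 = 0) : SmoothN (n / 2) := by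
  obtain ⟨d, c, b, a, rfl⟩ := hs
  have ha : 1 ≤ a := (mod2_iff d c b a).mp h
  obtain ⟨a', rfl⟩ : ∃ a', a = a' + 1 := ⟨a - 1, by omega⟩
  refine ⟨d, c, b, a', ?_⟩
  rw [show 7^d*5^c*3^b*2^(a'+1) = 2*(7^d*5^c*3^b*2^a') by rw [pow_succ]; ring]
  exact Nat.mul_div_cancel_left _ (by omega)

-- ----- descList: recursion equations (largest factor first, for A's loop) -----

theorem descList_one : descList 1 = [] := by
  unfold descList
  rw [stripCount_of_not 7 1 (by omega), stripCount_of_not 5 1 (by omega),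
      stripCount_of_not 3 1 (by omega), stripCount_of_not 2 1 (by omega)]
  rfl

theorem not_mod_div (n p q : Nat) (hq : 0 < q) (hp : ¬ n % p = 0) (h : n % q = 0) :
    ¬ (n / q) % p = 0 := by
  intro hd
  exact hp (Nat.mod_eq_zero_of_dvd ((Nat.dvd_of_mod_eq_zero hd).trans
    (Nat.div_dvd_of_dvd (Nat.dvd_of_mod_eq_zero h))))

theorem descList_seven (n : Nat) (hn : 0 < n) (h : n % 7 = 0) :
    descList n = 7 :: descList (n / 7) := by
  unfold descList
  rw [stripCount_of_dvd 7 n (by omega) hn h]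
  simp [List.replicate_succ]

theorem descList_five (n : Nat) (hn : 0 < n) (h7 : ¬ n % 7 = 0) (h : n % 5 = 0) :
    descList n = 5 :: descList (n / 5) := by
  have h7' := not_mod_div n 7 5 (by omega) h7 h
  unfold descList
  rw [stripCount_of_not 7 n (by simp [h7]), stripCount_of_not 7 (n / 5) (by simp [h7']),
      stripCount_of_dvd 5 n (by omega) hn h]
  simp [List.replicate_succ]

theorem descList_three (n : Nat) (hn : 0 < n) (h7 : ¬ n % 7 = 0) (h5 : ¬ n % 5 = 0)
    (h : n % 3 = 0) : descList n = 3 :: descList (n / 3) := by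
  have h7' := not_mod_div n 7 3 (by omega) h7 h
  have h5' := not_mod_div n 5 3 (by omega) h5 h
  unfold descList
  rw [stripCount_of_not 7 n (by simp [h7]), stripCount_of_not 7 (n / 3) (by simp [h7']),
      stripCount_of_not 5 n (by simp [h5]), stripCount_of_not 5 (n / 3) (by simp [h5']),
      stripCount_of_dvd 3 n (by omega) hn h]
  simp [List.replicate_succ]

theorem descList_two (n : Nat) (hn : 0 < n) (h7 : ¬ n % 7 = 0) (h5 : ¬ n % 5 = 0)
    (h3 : ¬ n % 3 = 0) (h : n % 2 = 0) : descList n = 2 :: descList (n / 2) := by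
  have h7' := not_mod_div n 7 2 (by omega) h7 h
  have h5' := not_mod_div n 5 2 (by omega) h5 h
  have h3' := not_mod_div n 3 2 (by omega) h3 h
  unfold descList
  rw [stripCount_of_not 7 n (by simp [h7]), stripCount_of_not 7 (n / 2) (by simp [h7']),
      stripCount_of_not 5 n (by simp [h5]), stripCount_of_not 5 (n / 2) (by simp [h5']),
      stripCount_of_not 3 n (by simp [h3]), stripCount_of_not 3 (n / 2) (by simp [h3']),
      stripCount_of_dvd 2 n (by omega) hn h]
  simp [List.replicate_succ]

-- ----- descList: closed characterization (for B's smallest-factor-first loop) -----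

theorem not7dvd (c b a : Nat) : ¬ 7 ∣ 5^c*3^b*2^a := by
  intro hd
  have hcop : Nat.Coprime 7 (5^c*3^b*2^a) :=
    Nat.Coprime.mul_right (Nat.Coprime.mul_right (Nat.Coprime.pow_right c (by norm_num))
      (Nat.Coprime.pow_right b (by norm_num))) (Nat.Coprime.pow_right a (by norm_num))
  have := Nat.Coprime.eq_one_of_dvd hcop hd
  omega

theorem not5dvd (b a : Nat) : ¬ 5 ∣ 3^b*2^a := by
  intro hd
  have hcop : Nat.Coprime 5 (3^b*2^a) :=
    Nat.Coprime.mul_right (Nat.Coprime.pow_right b (by norm_num)) (Nat.Coprime.pow_right a (by norm_num))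
  have := Nat.Coprime.eq_one_of_dvd hcop hd
  omega

theorem not3dvd (a : Nat) : ¬ 3 ∣ 2^a := by
  intro hd
  have := Nat.Coprime.eq_one_of_dvd (Nat.Coprime.pow_right a (by norm_num : Nat.Coprime 3 2)) hd
  omega

theorem stripCount_pow_mul (p : Nat) (hp : 2 ≤ p) (d m : Nat) (hm : 0 < m) (hnd : ¬ p ∣ m) :
    stripCount p (p^d * m) = (d, m) := by
  induction d with
  | zero =>
      rw [pow_zero, one_mul, stripCount_of_not]
      rintro ⟨-, -, hmod⟩
      exact hnd (Nat.dvd_of_mod_eq_zero hmod)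
  | succ d ih =>
      have hpos : 0 < p^(d+1)*m := by positivity
      have hmod : (p^(d+1)*m) % p = 0 := Nat.mod_eq_zero_of_dvd ⟨p^d*m, by rw [pow_succ]; ring⟩
      have hdiv : (p^(d+1)*m)/p = p^d*m := by
        rw [show p^(d+1)*m = p*(p^d*m) by rw [pow_succ]; ring]
        exact Nat.mul_div_cancel_left _ (by omega)
      rw [stripCount_of_dvd p _ hp hpos hmod, hdiv, ih]

theorem descList_char (d c b a : Nat) :
    descList (7^d*5^c*3^b*2^a) =
      List.replicate d (7:Int) ++ List.replicate c 5 ++ List.replicate b 3 ++ List.replicate a 2 := by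
  have h7 : stripCount 7 (7^d*5^c*3^b*2^a) = (d, 5^c*3^b*2^a) := by
    rw [show 7^d*5^c*3^b*2^a = 7^d*(5^c*3^b*2^a) by ring]
    exact stripCount_pow_mul 7 (by omega) d _ (by positivity) (not7dvd c b a)
  have h5 : stripCount 5 (5^c*3^b*2^a) = (c, 3^b*2^a) := by
    rw [show 5^c*3^b*2^a = 5^c*(3^b*2^a) by ring]
    exact stripCount_pow_mul 5 (by omega) c _ (by positivity) (not5dvd b a)
  have h3 : stripCount 3 (3^b*2^a) = (b, 2^a) :=
    stripCount_pow_mul 3 (by omega) b _ (by positivity) (not3dvd a)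
  have h2 : stripCount 2 (2^a) = (a, 1) := by
    rw [show 2^a = 2^a*1 by ring]
    exact stripCount_pow_mul 2 (by omega) a 1 (by omega) (by omega)
  simp [descList, h7, h5, h3, h2]

theorem descList_prod (n : Nat) (hs : SmoothN n) : (descList n).prod = (n : Int) := by
  obtain ⟨d, c, b, a, rfl⟩ := hs
  rw [descList_char]
  simp only [List.prod_append, List.prod_replicate]
  push_cast
  ring

theorem descList_ne_nil (n : Nat) (h2 : 2 ≤ n) (hs : SmoothN n) : descList n ≠ [] := by
  obtain ⟨d, c, b, a, rfl⟩ := hs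
  rw [descList_char]
  intro h
  simp only [List.append_eq_nil_iff, List.replicate_eq_nil_iff] at h
  obtain ⟨⟨⟨hd, hc⟩, hb⟩, ha⟩ := h
  subst hd hc hb ha
  simp at h2

-- descList recursion equations, SMALLEST factor last (for B's loop)
theorem dstep2 (n : Nat) (hs : SmoothN n) (h : n % 2 = 0) :
    descList n = descList (n / 2) ++ [(2:Int)] := by
  obtain ⟨d, c, b, a, rfl⟩ := hs
  have ha : 1 ≤ a := (mod2_iff d c b a).mp h
  obtain ⟨a', rfl⟩ : ∃ a', a = a' + 1 := ⟨a - 1, by omega⟩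
  have hdiv : (7^d*5^c*3^b*2^(a'+1))/2 = 7^d*5^c*3^b*2^a' := by
    rw [show 7^d*5^c*3^b*2^(a'+1) = 2*(7^d*5^c*3^b*2^a') by rw [pow_succ]; ring]
    exact Nat.mul_div_cancel_left _ (by omega)
  rw [hdiv, descList_char, descList_char, List.replicate_succ']
  simp

theorem dstep3 (n : Nat) (hs : SmoothN n) (h2 : ¬ n % 2 = 0) (h : n % 3 = 0) :
    descList n = descList (n / 3) ++ [(3:Int)] := by
  obtain ⟨d, c, b, a, rfl⟩ := hs
  have ha : a = 0 := by by_contra hne; exact h2 ((mod2_iff d c b a).mpr (by omega))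
  subst ha
  have hb : 1 ≤ b := (mod3_iff d c b 0).mp h
  obtain ⟨b', rfl⟩ : ∃ b', b = b' + 1 := ⟨b - 1, by omega⟩
  have hdiv : (7^d*5^c*3^(b'+1)*2^0)/3 = 7^d*5^c*3^b'*2^0 := by
    rw [show 7^d*5^c*3^(b'+1)*2^0 = 3*(7^d*5^c*3^b'*2^0) by rw [pow_succ]; ring]
    exact Nat.mul_div_cancel_left _ (by omega)
  rw [hdiv, descList_char, descList_char, List.replicate_succ']
  simp

theorem dstep5 (n : Nat) (hs : SmoothN n) (h2 : ¬ n % 2 = 0) (h3 : ¬ n % 3 = 0) (h : n % 5 = 0) :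
    descList n = descList (n / 5) ++ [(5:Int)] := by
  obtain ⟨d, c, b, a, rfl⟩ := hs
  have ha : a = 0 := by by_contra hne; exact h2 ((mod2_iff d c b a).mpr (by omega))
  have hb : b = 0 := by by_contra hne; exact h3 ((mod3_iff d c b a).mpr (by omega))
  subst ha hb
  have hc : 1 ≤ c := (mod5_iff d c 0 0).mp h
  obtain ⟨c', rfl⟩ : ∃ c', c = c' + 1 := ⟨c - 1, by omega⟩
  have hdiv : (7^d*5^(c'+1)*3^0*2^0)/5 = 7^d*5^c'*3^0*2^0 := by
    rw [show 7^d*5^(c'+1)*3^0*2^0 = 5*(7^d*5^c'*3^0*2^0) by rw [pow_succ]; ring]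
    exact Nat.mul_div_cancel_left _ (by omega)
  rw [hdiv, descList_char, descList_char, List.replicate_succ']
  simp

theorem dstep7 (n : Nat) (hs : SmoothN n) (h2 : ¬ n % 2 = 0) (h3 : ¬ n % 3 = 0)
    (h5 : ¬ n % 5 = 0) (h : n % 7 = 0) :
    descList n = descList (n / 7) ++ [(7:Int)] := by
  obtain ⟨d, c, b, a, rfl⟩ := hs
  have ha : a = 0 := by by_contra hne; exact h2 ((mod2_iff d c b a).mpr (by omega))
  have hb : b = 0 := by by_contra hne; exact h3 ((mod3_iff d c b a).mpr (by omega))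
  have hc : c = 0 := by by_contra hne; exact h5 ((mod5_iff d c b a).mpr (by omega))
  subst ha hb hc
  have hd : 1 ≤ d := (mod7_iff d 0 0 0).mp h
  obtain ⟨d', rfl⟩ : ∃ d', d = d' + 1 := ⟨d - 1, by omega⟩
  have hdiv : (7^(d'+1)*5^0*3^0*2^0)/7 = 7^d'*5^0*3^0*2^0 := by
    rw [show 7^(d'+1)*5^0*3^0*2^0 = 7*(7^d'*5^0*3^0*2^0) by rw [pow_succ]; ring]
    exact Nat.mul_div_cancel_left _ (by omega)
  rw [hdiv, descList_char, descList_char, List.replicate_succ']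
  simp

-- ----- A's loop computes descList -----

theorem gpfLoopA_spec : ∀ (fuel : Nat) (n : Nat) (acc : List Int), 1 ≤ n → n < 2^fuel →
    SmoothN n → gpfLoopA fuel (n : Int) acc = some (acc ++ descList n) := by
  intro fuel
  induction fuel with
  | zero => intro n acc h1 hlt _; simp at hlt; omega
  | succ fuel ih =>
    intro n acc h1 hlt hsm
    have hpow : 2 ^ (fuel + 1) = 2 * 2 ^ fuel := by ring
    rw [hpow] at hlt
    have m7 : PySem.Int.mod (n:Int) 7 = ((n % 7 : Nat) : Int) := by exact_mod_cast PySem.Int.mod_natCast n 7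
    have m5 : PySem.Int.mod (n:Int) 5 = ((n % 5 : Nat) : Int) := by exact_mod_cast PySem.Int.mod_natCast n 5
    have m3 : PySem.Int.mod (n:Int) 3 = ((n % 3 : Nat) : Int) := by exact_mod_cast PySem.Int.mod_natCast n 3
    have m2 : PySem.Int.mod (n:Int) 2 = ((n % 2 : Nat) : Int) := by exact_mod_cast PySem.Int.mod_natCast n 2
    have d7 : PySem.Int.floordiv (n:Int) 7 = ((n / 7 : Nat) : Int) := by exact_mod_cast PySem.Int.floordiv_natCast n 7
    have d5 : PySem.Int.floordiv (n:Int) 5 = ((n / 5 : Nat) : Int) := by exact_mod_cast PySem.Int.floordiv_natCast n 5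
    have d3 : PySem.Int.floordiv (n:Int) 3 = ((n / 3 : Nat) : Int) := by exact_mod_cast PySem.Int.floordiv_natCast n 3
    have d2 : PySem.Int.floordiv (n:Int) 2 = ((n / 2 : Nat) : Int) := by exact_mod_cast PySem.Int.floordiv_natCast n 2
    simp only [gpfLoopA]
    by_cases hn1 : n = 1
    · subst hn1; rw [if_pos (by norm_num), descList_one]; simp
    · rw [if_neg (by exact_mod_cast hn1)]
      by_cases h7 : n % 7 = 0
      · rw [m7, h7, Nat.cast_zero, if_pos rfl, d7,
          ih (n / 7) (acc ++ [7]) (by omega) (by omega) (smooth_div7 n hsm h7),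
          descList_seven n (by omega) h7]
        simp
      · rw [m7, if_neg (by exact_mod_cast h7)]
        by_cases h5 : n % 5 = 0
        · rw [m5, h5, Nat.cast_zero, if_pos rfl, d5,
            ih (n / 5) (acc ++ [5]) (by omega) (by omega) (smooth_div5 n hsm h5),
            descList_five n (by omega) h7 h5]
          simp
        · rw [m5, if_neg (by exact_mod_cast h5)]
          by_cases h3 : n % 3 = 0
          · rw [m3, h3, Nat.cast_zero, if_pos rfl, d3,
              ih (n / 3) (acc ++ [3]) (by omega) (by omega) (smooth_div3 n hsm h3),
              descList_three n (by omega) h7 h5 h3]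
            simp
          · rw [m3, if_neg (by exact_mod_cast h3)]
            by_cases h2 : n % 2 = 0
            · rw [m2, h2, Nat.cast_zero, if_pos rfl, d2,
                ih (n / 2) (acc ++ [2]) (by omega) (by omega) (smooth_div2 n hsm h2),
                descList_two n (by omega) h7 h5 h3 h2]
              simp
            · exact absurd (no_factor_absurd n (by omega) h7 h5 h3 h2 hsm) (by simp)

theorem descList_reverse_pairwise (n : Nat) : ((descList n).reverse).Pairwise (· ≤ ·) := by
  unfold descList
  simp only [List.reverse_append, List.reverse_replicate, List.append_assoc]
  simp [List.pairwise_append, List.pairwise_replicate, List.mem_replicate]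
  refine ⟨?_, ?_⟩ <;> intro _ b hb <;> omega

theorem get_prime_fact_spec (n : Nat) (h1 : 1 ≤ n) (hlt : n < 2^64)
    (hsm : SmoothN n) : get_prime_fact (n:Int) = some (descList n) := by
  unfold get_prime_fact
  rw [gpfLoopA_spec 64 n [] h1 hlt hsm]
  simp only [List.nil_append]
  by_cases h : descList n = []
  · simp [h]
  · rw [if_neg (by simp [h]),
      PySem.List.sorted_id_eq_of_perm_of_pairwise (descList n) ((descList n).reverse)
        (List.reverse_perm _) (descList_reverse_pairwise n)]
    simp

-- ----- the ascending channel chain, and both loops' relation to it -----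

-- the ascending channel chain: x, then running products with the factors in order
def ascChain (x : Int) : List Int → List Int
  | [] => [x]
  | f :: t => x :: ascChain (x * f) t

theorem ascChain_concat (l : List Int) : ∀ x y : Int,
    ascChain x (l ++ [y]) = ascChain x l ++ [x * l.prod * y] := by
  induction l with
  | nil => intro x y; simp [ascChain]
  | cons f t ih =>
      intro x y
      simp only [List.cons_append, ascChain, ih, List.prod_cons]
      rw [show x * f * t.prod * y = x * (f * t.prod) * y by ring]

-- A's for-loop over the factor list builds the ascending chain
theorem foldA_chain : ∀ (l pre : List Int) (cur : Int),
    l.foldl (fun cl factor => cl ++ [(PySem.List.pyGet? cl (-1)).getD 0 * factor]) (pre ++ [cur])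
      = pre ++ ascChain cur l := by
  intro l
  induction l with
  | nil => intro pre cur; simp [ascChain]
  | cons f t ih =>
      intro pre cur
      simp only [List.foldl_cons, PySem.List.pyGet?_neg_one_append_singleton, Option.getD_some]
      rw [List.append_assoc pre [cur] [cur * f],
        show ([cur] ++ [cur * f] : List Int) = [cur] ++ [cur * f] from rfl,
        ← List.append_assoc pre [cur] [cur * f], ih (pre ++ [cur]) (cur * f)]
      simp [ascChain]

-- B's divisible-case loop builds the reversed ascending chain
theorem divLoopB_spec : ∀ (fuel r : Nat) (lo : Int) (pre : List Int), 1 ≤ r → r < 2^fuel →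
    SmoothN r →
    divLoopB fuel (r : Int) (pre ++ [lo * (r : Int)])
      = some (pre ++ (ascChain lo (descList r)).reverse) := by
  intro fuel
  induction fuel with
  | zero => intro r lo pre h1 hlt _; simp at hlt; omega
  | succ fuel ih =>
    intro r lo pre h1 hlt hsm
    have hpow : 2 ^ (fuel + 1) = 2 * 2 ^ fuel := by ring
    rw [hpow] at hlt
    have m2 : PySem.Int.mod (r:Int) 2 = ((r % 2 : Nat) : Int) := by exact_mod_cast PySem.Int.mod_natCast r 2
    have m3 : PySem.Int.mod (r:Int) 3 = ((r % 3 : Nat) : Int) := by exact_mod_cast PySem.Int.mod_natCast r 3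
    have m5 : PySem.Int.mod (r:Int) 5 = ((r % 5 : Nat) : Int) := by exact_mod_cast PySem.Int.mod_natCast r 5
    have m7 : PySem.Int.mod (r:Int) 7 = ((r % 7 : Nat) : Int) := by exact_mod_cast PySem.Int.mod_natCast r 7
    simp only [divLoopB]
    by_cases hr1 : r = 1
    · subst hr1
      rw [if_pos (by norm_num), descList_one]
      simp [ascChain]
    · rw [if_neg (by exact_mod_cast hr1)]
      simp only [smallestFacB, PySem.List.pyGet?_neg_one_append_singleton, Option.getD_some]
      by_cases h2 : r % 2 = 0
      · have hdvd : (2:Int) ∣ (r:Int) := by exact_mod_cast Int.natCast_dvd_natCast.mpr (Nat.dvd_of_mod_eq_zero h2)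
        have dq : PySem.Int.floordiv (r:Int) 2 = ((r / 2 : Nat) : Int) := by exact_mod_cast PySem.Int.floordiv_natCast r 2
        have dc : PySem.Int.floordiv (lo * (r:Int)) 2 = lo * ((r / 2 : Nat) : Int) := by
          rw [PySem.Int.floordiv_eq_ediv_of_pos (by norm_num), Int.mul_ediv_assoc lo hdvd]
          norm_cast
        rw [m2, h2, Nat.cast_zero, if_pos rfl]
        show divLoopB fuel (PySem.Int.floordiv ((r:Nat) : Int) 2) (pre ++ [lo * ((r:Nat) : Int)] ++ [PySem.Int.floordiv (lo * ((r:Nat) : Int)) 2]) = some (pre ++ (ascChain lo (descList r)).reverse)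
        rw [dq, dc,
          ih (r / 2) lo (pre ++ [lo * (r:Int)]) (by omega) (by omega) (smooth_div2 r hsm h2),
          dstep2 r hsm h2, ascChain_concat, descList_prod (r / 2) (smooth_div2 r hsm h2)]
        have hval : lo * ((r / 2 : Nat) : Int) * 2 = lo * (r : Int) := by
          have hx : ((r / 2 : Nat) : Int) * 2 = (r : Int) := by
            exact_mod_cast congrArg (Nat.cast : Nat → Int) (Nat.div_mul_cancel (Nat.dvd_of_mod_eq_zero h2))
          calc lo * ((r / 2 : Nat) : Int) * 2 = lo * (((r / 2 : Nat) : Int) * 2) := by ring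
          _ = lo * (r : Int) := by rw [hx]
        rw [hval]
        simp
      · rw [m2, if_neg (by exact_mod_cast h2)]
        by_cases h3 : r % 3 = 0
        · have hdvd : (3:Int) ∣ (r:Int) := by exact_mod_cast Int.natCast_dvd_natCast.mpr (Nat.dvd_of_mod_eq_zero h3)
          have dq : PySem.Int.floordiv (r:Int) 3 = ((r / 3 : Nat) : Int) := by exact_mod_cast PySem.Int.floordiv_natCast r 3
          have dc : PySem.Int.floordiv (lo * (r:Int)) 3 = lo * ((r / 3 : Nat) : Int) := by
            rw [PySem.Int.floordiv_eq_ediv_of_pos (by norm_num), Int.mul_ediv_assoc lo hdvd]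
            norm_cast
          rw [m3, h3, Nat.cast_zero, if_pos rfl]
          show divLoopB fuel (PySem.Int.floordiv ((r:Nat) : Int) 3) (pre ++ [lo * ((r:Nat) : Int)] ++ [PySem.Int.floordiv (lo * ((r:Nat) : Int)) 3]) = some (pre ++ (ascChain lo (descList r)).reverse)
          rw [dq, dc,
            ih (r / 3) lo (pre ++ [lo * (r:Int)]) (by omega) (by omega) (smooth_div3 r hsm h3),
            dstep3 r hsm h2 h3, ascChain_concat, descList_prod (r / 3) (smooth_div3 r hsm h3)]
          have hval : lo * ((r / 3 : Nat) : Int) * 3 = lo * (r : Int) := by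
            have hx : ((r / 3 : Nat) : Int) * 3 = (r : Int) := by
              exact_mod_cast congrArg (Nat.cast : Nat → Int) (Nat.div_mul_cancel (Nat.dvd_of_mod_eq_zero h3))
            calc lo * ((r / 3 : Nat) : Int) * 3 = lo * (((r / 3 : Nat) : Int) * 3) := by ring
            _ = lo * (r : Int) := by rw [hx]
          rw [hval]
          simp
        · rw [m3, if_neg (by exact_mod_cast h3)]
          by_cases h5 : r % 5 = 0
          · have hdvd : (5:Int) ∣ (r:Int) := by exact_mod_cast Int.natCast_dvd_natCast.mpr (Nat.dvd_of_mod_eq_zero h5)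
            have dq : PySem.Int.floordiv (r:Int) 5 = ((r / 5 : Nat) : Int) := by exact_mod_cast PySem.Int.floordiv_natCast r 5
            have dc : PySem.Int.floordiv (lo * (r:Int)) 5 = lo * ((r / 5 : Nat) : Int) := by
              rw [PySem.Int.floordiv_eq_ediv_of_pos (by norm_num), Int.mul_ediv_assoc lo hdvd]
              norm_cast
            rw [m5, h5, Nat.cast_zero, if_pos rfl]
            show divLoopB fuel (PySem.Int.floordiv ((r:Nat) : Int) 5) (pre ++ [lo * ((r:Nat) : Int)] ++ [PySem.Int.floordiv (lo * ((r:Nat) : Int)) 5]) = some (pre ++ (ascChain lo (descList r)).reverse)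
            rw [dq, dc,
              ih (r / 5) lo (pre ++ [lo * (r:Int)]) (by omega) (by omega) (smooth_div5 r hsm h5),
              dstep5 r hsm h2 h3 h5, ascChain_concat, descList_prod (r / 5) (smooth_div5 r hsm h5)]
            have hval : lo * ((r / 5 : Nat) : Int) * 5 = lo * (r : Int) := by
              have hx : ((r / 5 : Nat) : Int) * 5 = (r : Int) := by
                exact_mod_cast congrArg (Nat.cast : Nat → Int) (Nat.div_mul_cancel (Nat.dvd_of_mod_eq_zero h5))
              calc lo * ((r / 5 : Nat) : Int) * 5 = lo * (((r / 5 : Nat) : Int) * 5) := by ring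
              _ = lo * (r : Int) := by rw [hx]
            rw [hval]
            simp
          · rw [m5, if_neg (by exact_mod_cast h5)]
            by_cases h7 : r % 7 = 0
            · have hdvd : (7:Int) ∣ (r:Int) := by exact_mod_cast Int.natCast_dvd_natCast.mpr (Nat.dvd_of_mod_eq_zero h7)
              have dq : PySem.Int.floordiv (r:Int) 7 = ((r / 7 : Nat) : Int) := by exact_mod_cast PySem.Int.floordiv_natCast r 7
              have dc : PySem.Int.floordiv (lo * (r:Int)) 7 = lo * ((r / 7 : Nat) : Int) := by
                rw [PySem.Int.floordiv_eq_ediv_of_pos (by norm_num), Int.mul_ediv_assoc lo hdvd]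
                norm_cast
              rw [m7, h7, Nat.cast_zero, if_pos rfl]
              show divLoopB fuel (PySem.Int.floordiv ((r:Nat) : Int) 7) (pre ++ [lo * ((r:Nat) : Int)] ++ [PySem.Int.floordiv (lo * ((r:Nat) : Int)) 7]) = some (pre ++ (ascChain lo (descList r)).reverse)
              rw [dq, dc,
                ih (r / 7) lo (pre ++ [lo * (r:Int)]) (by omega) (by omega) (smooth_div7 r hsm h7),
                dstep7 r hsm h2 h3 h5 h7, ascChain_concat, descList_prod (r / 7) (smooth_div7 r hsm h7)]
              have hval : lo * ((r / 7 : Nat) : Int) * 7 = lo * (r : Int) := by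
                have hx : ((r / 7 : Nat) : Int) * 7 = (r : Int) := by
                  exact_mod_cast congrArg (Nat.cast : Nat → Int) (Nat.div_mul_cancel (Nat.dvd_of_mod_eq_zero h7))
                calc lo * ((r / 7 : Nat) : Int) * 7 = lo * (((r / 7 : Nat) : Int) * 7) := by ring
                _ = lo * (r : Int) := by rw [hx]
              rw [hval]
              simp
            · exact absurd (no_factor_absurd r (by omega) h7 h5 h3 h2 hsm) (by simp)

-- B's non-divisible-case loop builds the reversed ascending chain from the largest prime factor
theorem nonDivLoopB_spec : ∀ (fuel v : Nat) (pre : List Int) (p0 : Int) (rest : List Int),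
    2 ≤ v → v < 2^fuel → SmoothN v → descList v = p0 :: rest →
    nonDivLoopB fuel (pre ++ [(v : Int)]) = some (pre ++ (ascChain p0 rest).reverse) := by
  intro fuel
  induction fuel with
  | zero => intro v pre p0 rest h2v hlt _ _; simp at hlt; omega
  | succ fuel ih =>
    intro v pre p0 rest h2v hlt hsm hd
    have hpow : 2 ^ (fuel + 1) = 2 * 2 ^ fuel := by ring
    rw [hpow] at hlt
    simp only [nonDivLoopB, PySem.List.pyGet?_neg_one_append_singleton, Option.getD_some]
    by_cases hvp : v = 2 ∨ v = 3 ∨ v = 5 ∨ v = 7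
    · have hcond : (v:Int) = 2 ∨ (v:Int) = 3 ∨ (v:Int) = 5 ∨ (v:Int) = 7 := by omega
      rw [if_pos hcond]
      have hdv : descList v = [(v:Int)] := by
        rcases hvp with rfl | rfl | rfl | rfl
        · rw [descList_two 2 (by omega) (by omega) (by omega) (by omega) (by omega), descList_one]
          norm_num
        · rw [descList_three 3 (by omega) (by omega) (by omega) (by omega), descList_one]
          norm_num
        · rw [descList_five 5 (by omega) (by omega) (by omega), descList_one]
          norm_num
        · rw [descList_seven 7 (by omega) (by omega), descList_one]
          norm_num
      rw [hdv] at hd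
      obtain ⟨hp0, hrest⟩ := List.cons_eq_cons.mp hd
      subst hp0
      subst hrest
      simp [ascChain]
    · have hcond : ¬ ((v:Int) = 2 ∨ (v:Int) = 3 ∨ (v:Int) = 5 ∨ (v:Int) = 7) := by omega
      rw [if_neg hcond]
      simp only [smallestFacB]
      have m2 : PySem.Int.mod (v:Int) 2 = ((v % 2 : Nat) : Int) := by exact_mod_cast PySem.Int.mod_natCast v 2
      have m3 : PySem.Int.mod (v:Int) 3 = ((v % 3 : Nat) : Int) := by exact_mod_cast PySem.Int.mod_natCast v 3
      have m5 : PySem.Int.mod (v:Int) 5 = ((v % 5 : Nat) : Int) := by exact_mod_cast PySem.Int.mod_natCast v 5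
      have m7 : PySem.Int.mod (v:Int) 7 = ((v % 7 : Nat) : Int) := by exact_mod_cast PySem.Int.mod_natCast v 7
      by_cases h2 : v % 2 = 0
      · have hvq : v = 2 * (v / 2) := (Nat.mul_div_cancel' (Nat.dvd_of_mod_eq_zero h2)).symm
        have hq2 : 2 ≤ v / 2 := by omega
        have hsq : SmoothN (v / 2) := smooth_div2 v hsm h2
        obtain ⟨q0, rest', hdq⟩ : ∃ q0 rest', descList (v / 2) = q0 :: rest' := by
          rcases hx : descList (v / 2) with _ | ⟨q0, rest'⟩
          · exact absurd hx (descList_ne_nil (v / 2) hq2 hsq)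
          · exact ⟨q0, rest', rfl⟩
        have hsplit : p0 = q0 ∧ rest = rest' ++ [(2:Int)] := by
          have hh := hd.symm.trans (dstep2 v hsm h2)
          rw [hdq] at hh
          simp only [List.cons_append, List.cons.injEq] at hh
          exact hh
        obtain ⟨rfl, rfl⟩ := hsplit
        have dvv : PySem.Int.floordiv (v:Int) 2 = ((v / 2 : Nat) : Int) := by exact_mod_cast PySem.Int.floordiv_natCast v 2
        rw [m2, h2, Nat.cast_zero, if_pos rfl]
        show nonDivLoopB fuel (pre ++ [(v : Int)] ++ [PySem.Int.floordiv ((v:Nat) : Int) 2]) = some (pre ++ (ascChain p0 (rest' ++ [(2:Int)])).reverse)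
        rw [dvv, List.append_assoc pre [(v:Int)] _,
          ← List.append_assoc pre [(v:Int)] _,
          ih (v / 2) (pre ++ [(v:Int)]) p0 rest' hq2 (by omega) hsq hdq,
          ascChain_concat]
        have hval : p0 * rest'.prod * 2 = (v:Int) := by
          have hp := descList_prod v hsm
          rw [hd, List.prod_cons, List.prod_append] at hp
          simp only [List.prod_cons, List.prod_nil] at hp
          calc p0 * rest'.prod * 2 = p0 * (rest'.prod * (2 * 1)) := by ring
          _ = (v:Int) := hp
        rw [hval]
        simp
      · rw [m2, if_neg (by exact_mod_cast h2)]
        by_cases h3 : v % 3 = 0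
        · have hvq : v = 3 * (v / 3) := (Nat.mul_div_cancel' (Nat.dvd_of_mod_eq_zero h3)).symm
          have hq2 : 2 ≤ v / 3 := by omega
          have hsq : SmoothN (v / 3) := smooth_div3 v hsm h3
          obtain ⟨q0, rest', hdq⟩ : ∃ q0 rest', descList (v / 3) = q0 :: rest' := by
            rcases hx : descList (v / 3) with _ | ⟨q0, rest'⟩
            · exact absurd hx (descList_ne_nil (v / 3) hq2 hsq)
            · exact ⟨q0, rest', rfl⟩
          have hsplit : p0 = q0 ∧ rest = rest' ++ [(3:Int)] := by
            have hh := hd.symm.trans (dstep3 v hsm h2 h3)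
            rw [hdq] at hh
            simp only [List.cons_append, List.cons.injEq] at hh
            exact hh
          obtain ⟨rfl, rfl⟩ := hsplit
          have dvv : PySem.Int.floordiv (v:Int) 3 = ((v / 3 : Nat) : Int) := by exact_mod_cast PySem.Int.floordiv_natCast v 3
          rw [m3, h3, Nat.cast_zero, if_pos rfl]
          show nonDivLoopB fuel (pre ++ [(v : Int)] ++ [PySem.Int.floordiv ((v:Nat) : Int) 3]) = some (pre ++ (ascChain p0 (rest' ++ [(3:Int)])).reverse)
          rw [dvv, List.append_assoc pre [(v:Int)] _,
            ← List.append_assoc pre [(v:Int)] _,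
            ih (v / 3) (pre ++ [(v:Int)]) p0 rest' hq2 (by omega) hsq hdq,
            ascChain_concat]
          have hval : p0 * rest'.prod * 3 = (v:Int) := by
            have hp := descList_prod v hsm
            rw [hd, List.prod_cons, List.prod_append] at hp
            simp only [List.prod_cons, List.prod_nil] at hp
            calc p0 * rest'.prod * 3 = p0 * (rest'.prod * (3 * 1)) := by ring
            _ = (v:Int) := hp
          rw [hval]
          simp
        · rw [m3, if_neg (by exact_mod_cast h3)]
          by_cases h5 : v % 5 = 0
          · have hvq : v = 5 * (v / 5) := (Nat.mul_div_cancel' (Nat.dvd_of_mod_eq_zero h5)).symm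
            have hq2 : 2 ≤ v / 5 := by omega
            have hsq : SmoothN (v / 5) := smooth_div5 v hsm h5
            obtain ⟨q0, rest', hdq⟩ : ∃ q0 rest', descList (v / 5) = q0 :: rest' := by
              rcases hx : descList (v / 5) with _ | ⟨q0, rest'⟩
              · exact absurd hx (descList_ne_nil (v / 5) hq2 hsq)
              · exact ⟨q0, rest', rfl⟩
            have hsplit : p0 = q0 ∧ rest = rest' ++ [(5:Int)] := by
              have hh := hd.symm.trans (dstep5 v hsm h2 h3 h5)
              rw [hdq] at hh
              simp only [List.cons_append, List.cons.injEq] at hh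
              exact hh
            obtain ⟨rfl, rfl⟩ := hsplit
            have dvv : PySem.Int.floordiv (v:Int) 5 = ((v / 5 : Nat) : Int) := by exact_mod_cast PySem.Int.floordiv_natCast v 5
            rw [m5, h5, Nat.cast_zero, if_pos rfl]
            show nonDivLoopB fuel (pre ++ [(v : Int)] ++ [PySem.Int.floordiv ((v:Nat) : Int) 5]) = some (pre ++ (ascChain p0 (rest' ++ [(5:Int)])).reverse)
            rw [dvv, List.append_assoc pre [(v:Int)] _,
              ← List.append_assoc pre [(v:Int)] _,
              ih (v / 5) (pre ++ [(v:Int)]) p0 rest' hq2 (by omega) hsq hdq,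
              ascChain_concat]
            have hval : p0 * rest'.prod * 5 = (v:Int) := by
              have hp := descList_prod v hsm
              rw [hd, List.prod_cons, List.prod_append] at hp
              simp only [List.prod_cons, List.prod_nil] at hp
              calc p0 * rest'.prod * 5 = p0 * (rest'.prod * (5 * 1)) := by ring
              _ = (v:Int) := hp
            rw [hval]
            simp
          · rw [m5, if_neg (by exact_mod_cast h5)]
            by_cases h7 : v % 7 = 0
            · have hvq : v = 7 * (v / 7) := (Nat.mul_div_cancel' (Nat.dvd_of_mod_eq_zero h7)).symm
              have hq2 : 2 ≤ v / 7 := by omega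
              have hsq : SmoothN (v / 7) := smooth_div7 v hsm h7
              obtain ⟨q0, rest', hdq⟩ : ∃ q0 rest', descList (v / 7) = q0 :: rest' := by
                rcases hx : descList (v / 7) with _ | ⟨q0, rest'⟩
                · exact absurd hx (descList_ne_nil (v / 7) hq2 hsq)
                · exact ⟨q0, rest', rfl⟩
              have hsplit : p0 = q0 ∧ rest = rest' ++ [(7:Int)] := by
                have hh := hd.symm.trans (dstep7 v hsm h2 h3 h5 h7)
                rw [hdq] at hh
                simp only [List.cons_append, List.cons.injEq] at hh
                exact hh
              obtain ⟨rfl, rfl⟩ := hsplit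
              have dvv : PySem.Int.floordiv (v:Int) 7 = ((v / 7 : Nat) : Int) := by exact_mod_cast PySem.Int.floordiv_natCast v 7
              rw [m7, h7, Nat.cast_zero, if_pos rfl]
              show nonDivLoopB fuel (pre ++ [(v : Int)] ++ [PySem.Int.floordiv ((v:Nat) : Int) 7]) = some (pre ++ (ascChain p0 (rest' ++ [(7:Int)])).reverse)
              rw [dvv, List.append_assoc pre [(v:Int)] _,
                ← List.append_assoc pre [(v:Int)] _,
                ih (v / 7) (pre ++ [(v:Int)]) p0 rest' hq2 (by omega) hsq hdq,
                ascChain_concat]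
              have hval : p0 * rest'.prod * 7 = (v:Int) := by
                have hp := descList_prod v hsm
                rw [hd, List.prod_cons, List.prod_append] at hp
                simp only [List.prod_cons, List.prod_nil] at hp
                calc p0 * rest'.prod * 7 = p0 * (rest'.prod * (7 * 1)) := by ring
                _ = (v:Int) := hp
              rw [hval]
              simp
            · exact absurd (no_factor_absurd v (by omega) h7 h5 h3 h2 hsm) (by simp)

-- B on a descending pair is B on the ascending pair, reversed
theorem alt_swap (input_size output_size : Int) (h : output_size < input_size) :
    get_chan_list_alt input_size output_size = (get_chan_list_alt output_size input_size).reverse := by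
  unfold get_chan_list_alt
  rw [if_neg (by omega : ¬ input_size = output_size), if_neg (by omega : ¬ output_size = input_size)]
  simp only [if_neg (by omega : ¬ input_size < output_size), if_pos h, List.reverse_reverse]

-- on an ascending admitted pair the two ports agree
theorem asc_eq (lo hi : Int) (hlt : lo < hi) (hhi : hi ≤ 2147483648) (hlo0 : lo ≠ 0)
    (hpre : if PySem.Int.mod hi lo = 0 then
        1 ≤ PySem.Int.floordiv hi lo ∧ Smooth7 (PySem.Int.floordiv hi lo)
      else 2 ≤ hi ∧ Smooth7 hi) :
    get_chan_list lo hi = get_chan_list_alt lo hi := by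
  rw [get_chan_list]
  unfold get_chan_list_alt
  rw [if_neg (by omega : ¬ lo > hi), if_pos hlt, if_neg (by omega : ¬ lo = hi)]
  simp only [if_pos hlt]
  by_cases hmod : PySem.Int.mod hi lo = 0
  · rw [if_pos hmod] at hpre ⊢
    simp only [if_pos hmod]
    obtain ⟨hq1, hqs⟩ := hpre
    set q := PySem.Int.floordiv hi lo with hq
    have heq : q * lo = hi := by
      have := PySem.Int.floordiv_mul_add_mod hi lo
      rw [hmod, ← hq] at this; omega
    have hlo1 : 1 ≤ lo := by
      rcases lt_trichotomy lo 0 with hneg | hz | hpos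
      · exfalso
        have h2 : q * lo ≤ 1 * lo := mul_le_mul_of_nonpos_right hq1 (le_of_lt hneg)
        rw [heq, one_mul] at h2
        omega
      · omega
      · omega
    have hqhi : q ≤ hi := by
      have h2 : q * 1 ≤ q * lo := mul_le_mul_of_nonneg_left hlo1 (by omega)
      rw [heq, mul_one] at h2
      omega
    have hqn : q = ((q.toNat : Nat) : Int) := (Int.toNat_of_nonneg (by omega)).symm
    have h1n : 1 ≤ q.toNat := by omega
    have hltn : q.toNat < 2^64 := by omega
    have hsn : SmoothN q.toNat := smoothN_of_smooth7 q hq1 hqs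
    have hhi_eq : [hi] = ([] : List Int) ++ [lo * ((q.toNat : Nat) : Int)] := by
      rw [← hqn]
      simp [← heq, mul_comm]
    rw [hqn, get_prime_fact_spec q.toNat h1n hltn hsn]
    simp only [Option.getD_some]
    rw [hhi_eq, divLoopB_spec 64 q.toNat lo [] h1n hltn hsn]
    simp only [Option.getD_some, List.nil_append, List.reverse_reverse]
    exact foldA_chain (descList q.toNat) [] lo
  · rw [if_neg hmod] at hpre ⊢
    simp only [if_neg hmod]
    obtain ⟨hhi2, hhs⟩ := hpre
    have hhn : hi = ((hi.toNat : Nat) : Int) := (Int.toNat_of_nonneg (by omega)).symm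
    have h1n : 1 ≤ hi.toNat := by omega
    have h2n : 2 ≤ hi.toNat := by omega
    have hltn : hi.toNat < 2^64 := by omega
    have hsmn : SmoothN hi.toNat := smoothN_of_smooth7 hi (by omega) hhs
    obtain ⟨p0, rest, hd⟩ : ∃ p0 rest, descList hi.toNat = p0 :: rest := by
      rcases hdn : descList hi.toNat with _ | ⟨p0, rest⟩
      · exact absurd hdn (descList_ne_nil hi.toNat h2n hsmn)
      · exact ⟨p0, rest, rfl⟩
    rw [hhn, get_prime_fact_spec hi.toNat h1n hltn hsmn]
    simp only [Option.getD_some]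
    rw [hd]
    have hslice : PySem.List.slice (p0 :: rest) (some 1) none = rest := by
      have := PySem.List.slice_from_natCast (p0 :: rest) 1
      simpa using this
    rw [hslice, PySem.List.pyGet?_zero_cons]
    simp only [Option.getD_some]
    rw [show ([((hi.toNat : Nat) : Int)] : List Int) = ([] : List Int) ++ [((hi.toNat : Nat) : Int)] from rfl,
      nonDivLoopB_spec 64 hi.toNat [] p0 rest h2n hltn hsmn hd]
    simp only [Option.getD_some, List.nil_append]
    rw [foldA_chain rest [lo, lo] p0]
    simp [List.reverse_append]

-- ===== VERDICT =====
theorem get_chan_list_spec : Claim_equal_get_chan_list := by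
  intro i o hdom hpre
  unfold Spec_get_chan_list
  have hdb : -2147483648 ≤ i ∧ i ≤ 2147483648 ∧ -2147483648 ≤ o ∧ o ≤ 2147483648 := by
    simp [Dom_get_chan_list, pvDomInt] at hdom; omega
  rcases lt_trichotomy i o with hlt | heq | hgt
  · rcases hpre with heq' | ⟨hmin, hcond⟩
    · omega
    rw [min_eq_left (by omega : i ≤ o)] at hmin hcond
    rw [max_eq_right (by omega : i ≤ o)] at hcond
    exact asc_eq i o hlt (by omega) hmin hcond
  · subst heq
    rw [get_chan_list]
    rw [if_neg (by omega : ¬ i > i), if_neg (by omega : ¬ i < i)]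
    unfold get_chan_list_alt
    rw [if_pos rfl]
  · rcases hpre with heq' | ⟨hmin, hcond⟩
    · omega
    rw [min_eq_right (by omega : o ≤ i)] at hmin hcond
    rw [max_eq_left (by omega : o ≤ i)] at hcond
    rw [get_chan_list, if_pos (by omega : i > o),
      asc_eq o i hgt (by omega) hmin hcond, ← alt_swap i o hgt]
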